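-- pv_equiv track=rewrite | github.com/pypi-data/pypi-mirror-403 | packages/vesuvius/vesuvius-0.2.3-py3-none-any.whl/vesuvius/utils/utils.py | get_n_blocks_per_stage
-- ===== SOURCE A (Python) =====
-- def get_n_blocks_per_stage(num_stages):
--     """
--     Stage 0 -> 1 block
--     Stage 1 -> 3 blocks
--     Stage 2 -> 4 blocks
--     Stages 3+ -> 6 blocks each
--     """
--     blocks = []
--     for i in range(num_stages):
--         if i == 0:
--             blocks.append(1)
--         elif i == 1:
--             blocks.append(3)
--         elif i == 2:
--             blocks.append(4)
--         else:
--             blocks.append(6)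
--     return blocks
-- ===== SOURCE B (Python) =====
-- def get_n_blocks_per_stage(num_stages):
--     n = max(num_stages, 0)
--     return [1, 3, 4][:n] + [6] * (n - 3)
-- ===== Notes on version B (the rewrite author's own statement) =====
-- stated objective: simpler
-- what changed: Replaces the per-index loop with a closed-form construction: slice of the base table [1,3,4] plus a replicated tail of 6s.
import Mathlib
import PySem

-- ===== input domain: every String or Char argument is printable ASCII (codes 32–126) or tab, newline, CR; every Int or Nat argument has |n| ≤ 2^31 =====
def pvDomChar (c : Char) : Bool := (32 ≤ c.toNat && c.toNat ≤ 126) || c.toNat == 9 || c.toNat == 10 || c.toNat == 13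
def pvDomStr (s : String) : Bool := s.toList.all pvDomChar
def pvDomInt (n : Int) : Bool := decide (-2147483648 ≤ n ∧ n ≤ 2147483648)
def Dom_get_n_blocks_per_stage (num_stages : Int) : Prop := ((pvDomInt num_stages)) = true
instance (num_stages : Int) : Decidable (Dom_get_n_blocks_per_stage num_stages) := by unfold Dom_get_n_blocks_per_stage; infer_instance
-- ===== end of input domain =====

-- ===== PORT A =====
-- B changes: closed-form slice+replicate construction instead of the per-index loop (simpler).
def get_n_blocks_per_stage (num_stages : Int) : List Int :=
  (PySem.List.pyRange 0 num_stages 1).foldl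
    (fun blocks i =>
      if i == 0 then blocks ++ [1]
      else if i == 1 then blocks ++ [3]
      else if i == 2 then blocks ++ [4]
      else blocks ++ [6]) []

-- ===== PORT B =====
def get_n_blocks_per_stage_alt (num_stages : Int) : List Int :=
  PySem.List.slice [1, 3, 4] none (some (max num_stages 0)) ++
    PySem.List.pyRepeat [6] (max num_stages 0 - 3)

-- ===== PRECONDITION & SPEC =====
def Spec_get_n_blocks_per_stage (num_stages : Int) (out : List Int) : Prop := out = get_n_blocks_per_stage_alt num_stages
instance (num_stages : Int) (out : List Int) : Decidable (Spec_get_n_blocks_per_stage num_stages out) := by unfold Spec_get_n_blocks_per_stage; infer_instance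

-- ===== CLAIM (what is proved, stated in full; the proofs are below) =====
def Claim_equal_get_n_blocks_per_stage : Prop := ∀ (num_stages : Int), Dom_get_n_blocks_per_stage num_stages → Spec_get_n_blocks_per_stage num_stages (get_n_blocks_per_stage num_stages)

-- ===== LEMMAS AND PROOFS =====

lemma foldA_closed (m : Nat) :
    (PySem.List.pyRange 0 (m : Int) 1).foldl
      (fun blocks i =>
        if i == 0 then blocks ++ [1]
        else if i == 1 then blocks ++ [3]
        else if i == 2 then blocks ++ [4]
        else blocks ++ [(6 : Int)]) []
    = ([1, 3, 4] : List Int).take m ++ List.replicate (m - 3) 6 := by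
  induction m with
  | zero => decide
  | succ k ih =>
    rw [show ((k + 1 : Nat) : Int) = (0 : Int) + (k : Int) + 1 by push_cast; ring,
        PySem.List.pyRange_one_succ_right (by omega), List.foldl_append]
    simp only [List.foldl_cons, List.foldl_nil, zero_add] at *
    rw [ih]
    match k with
    | 0 => decide
    | 1 => decide
    | 2 => decide
    | (m+3) =>
      have h0 : ((m : Int) + 3 == 0) = false := by simp only [beq_eq_false_iff_ne, ne_eq]; omega
      have h1 : ((m : Int) + 3 == 1) = false := by simp only [beq_eq_false_iff_ne, ne_eq]; omega
      have h2 : ((m : Int) + 3 == 2) = false := by simp only [beq_eq_false_iff_ne, ne_eq]; omega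
      have t1 : ([1, 3, 4] : List Int).take (m + 3) = [1, 3, 4] :=
        List.take_of_length_le (by simp)
      have t2 : ([1, 3, 4] : List Int).take (m + 3 + 1) = [1, 3, 4] :=
        List.take_of_length_le (by simp)
      push_cast
      simp [h0, h1, h2, t1, t2, List.replicate_succ']

lemma A_eq_alt (num_stages : Int) :
    get_n_blocks_per_stage num_stages = get_n_blocks_per_stage_alt num_stages := by
  unfold get_n_blocks_per_stage get_n_blocks_per_stage_alt
  by_cases h : num_stages ≤ 0
  · have h1 : PySem.List.pyRange 0 num_stages 1 = [] := by
      rw [PySem.List.pyRange_one]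
      simp
      omega
    have h2 : max num_stages 0 = 0 := max_eq_right h
    rw [h1, h2]
    decide
  · have h2 : max num_stages 0 = num_stages := max_eq_left (by omega)
    have hm : num_stages = ((num_stages.toNat : Nat) : Int) := by omega
    rw [h2, hm, foldA_closed, PySem.List.slice_to_natCast,
        PySem.List.pyRepeat_singleton]
    congr 1
    simp [max_eq_left (show (0:Int) ≤ num_stages by omega)]
    omega

-- ===== VERDICT (by name: the statement is the Claim_ definition above) =====
theorem get_n_blocks_per_stage_spec : Claim_equal_get_n_blocks_per_stage := by
  intro num_stages _
  unfold Spec_get_n_blocks_per_stage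
  exact A_eq_alt num_stages
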